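-- pv_equiv track=rewrite | github.com/zhusanqiang2025/ZhiRong-LawAssist-V2 | backend/app/tasks/progress.py | calculate_node_progress
-- ===== SOURCE A (Python) =====
-- def calculate_node_progress(completed_nodes: list, total_nodes: list) -> dict:
--     """
--     计算各节点进度
--
--     Args:
--         completed_nodes: 已完成的节点列表
--         total_nodes: 所有节点列表
--
--     Returns:
--         节点进度字典
--     """
--     node_progress = {}
--     total = len(total_nodes)
--
--     for i, node in enumerate(total_nodes):
--         if node in completed_nodes:
--             node_progress[node] = 100
--         else:
--             # 计算当前节点的进度（基于已完成节点数）
--             completed_count = len(completed_nodes)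
--             if completed_count > 0 and completed_count <= total:
--                 # 简单的线性进度计算
--                 node_progress[node] = 0
--             else:
--                 node_progress[node] = 0
--
--     return node_progress
-- ===== SOURCE B (Python) =====
-- def calculate_node_progress(completed_nodes: list, total_nodes: list) -> dict:
--     node_progress = {node: 0 for node in total_nodes}
--     for node in completed_nodes:
--         if node in node_progress:
--             node_progress[node] = 100
--     return node_progress
-- ===== Notes on version B (the rewrite author's own statement) =====
-- stated objective: faster
-- what changed: Builds the zero-valued table over total_nodes first, then makes a single pass over completed_nodes marking present keys 100, replacing A's per-node linear scan of completed_nodes with O(1) dict membership.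
import Mathlib
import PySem

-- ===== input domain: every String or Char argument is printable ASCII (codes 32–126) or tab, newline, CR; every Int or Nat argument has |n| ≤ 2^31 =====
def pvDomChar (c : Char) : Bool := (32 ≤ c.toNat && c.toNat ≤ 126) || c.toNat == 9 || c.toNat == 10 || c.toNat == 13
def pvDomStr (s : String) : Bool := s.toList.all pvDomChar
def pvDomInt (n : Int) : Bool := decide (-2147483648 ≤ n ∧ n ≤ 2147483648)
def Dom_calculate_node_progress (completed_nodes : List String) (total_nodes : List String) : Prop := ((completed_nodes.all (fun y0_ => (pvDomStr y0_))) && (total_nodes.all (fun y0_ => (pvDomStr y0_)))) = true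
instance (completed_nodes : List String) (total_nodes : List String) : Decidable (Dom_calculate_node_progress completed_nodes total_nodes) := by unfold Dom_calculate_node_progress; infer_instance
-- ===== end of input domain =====

-- B builds the zero table over total_nodes first, then one pass over completed_nodes marks
-- present keys 100 (dict membership instead of A's per-node scan of completed_nodes).


-- ===== PORT A =====
def calculate_node_progress (completed_nodes : List String) (total_nodes : List String) : List (String × Int) :=
  let total : Int := (total_nodes.length : Int)
  (total_nodes.foldl
    (fun node_progress node =>
      if completed_nodes.contains node then
        node_progress.insert node 100
      else
        let completed_count : Int := (completed_nodes.length : Int)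
        if completed_count > 0 ∧ completed_count ≤ total then
          node_progress.insert node 0
        else
          node_progress.insert node 0)
    PySem.Dict.empty).items

-- ===== PORT B =====
def calculate_node_progress_alt (completed_nodes : List String) (total_nodes : List String) : List (String × Int) :=
  let init : PySem.Dict String Int :=
    total_nodes.foldl (fun d node => d.insert node 0) PySem.Dict.empty
  (completed_nodes.foldl
    (fun node_progress node =>
      if node_progress.contains node then node_progress.insert node 100 else node_progress)
    init).items

-- ===== PRECONDITION & SPEC =====
def Spec_calculate_node_progress (completed_nodes : List String) (total_nodes : List String) (out : List (String × Int)) : Prop := out = calculate_node_progress_alt completed_nodes total_nodes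
instance (completed_nodes : List String) (total_nodes : List String) (out : List (String × Int)) : Decidable (Spec_calculate_node_progress completed_nodes total_nodes out) := by unfold Spec_calculate_node_progress; infer_instance

-- ===== CLAIM (what is proved, stated in full; the proofs are below) =====
def Claim_equal_calculate_node_progress : Prop := ∀ (completed_nodes : List String) (total_nodes : List String), Dom_calculate_node_progress completed_nodes total_nodes → Spec_calculate_node_progress completed_nodes total_nodes (calculate_node_progress completed_nodes total_nodes)

-- ===== LEMMAS AND PROOFS =====

-- the item rewrite B's second loop performs
def pvMark (c : List String) (p : String × Int) : String × Int :=
  if p.1 ∈ c then (p.1, 100) else p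

theorem pvMark_fst (c : List String) (p : String × Int) : (pvMark c p).1 = p.1 := by
  unfold pvMark; split <;> rfl

-- keys are preserved by the pvMark item map, hence contains agrees
theorem contains_of_items_map (d d' : PySem.Dict String Int) (c : List String)
    (h : d.items = d'.items.map (pvMark c)) (n : String) :
    d.contains n = d'.contains n := by
  rw [PySem.Dict.contains_eq_decide_mem_keys, PySem.Dict.contains_eq_decide_mem_keys]
  have : PySem.Dict.keys d = PySem.Dict.keys d' := by
    simp only [PySem.Dict.keys, h, List.map_map]
    exact List.map_congr_left (fun p _ => pvMark_fst c p)
  rw [this]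

-- composing the in-place overwrite at key n with pvMark, pointwise
theorem pvMark_step (c : List String) (n : String) (p : String × Int) :
    (fun q => if q.1 == n then (n, if n ∈ c then (100 : Int) else 0) else q) (pvMark c p)
      = pvMark c ((fun q => if q.1 == n then (n, (0 : Int)) else q) p) := by
  by_cases hpn : p.1 = n
  · by_cases hcc : n ∈ c <;> simp [pvMark, hpn, hcc]
  · by_cases hcc : p.1 ∈ c <;> simp [pvMark, hpn, hcc]

-- A's fold tracks B's zero-building fold through the pvMark item map
theorem foldA_items (c : List String) (t : List String) (tot : Int) :
    ∀ (d d' : PySem.Dict String Int), d.items = d'.items.map (pvMark c) →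
    (t.foldl
      (fun node_progress node =>
        if c.contains node then node_progress.insert node 100
        else
          if (c.length : Int) > 0 ∧ (c.length : Int) ≤ tot then node_progress.insert node 0
          else node_progress.insert node 0) d).items
    = (t.foldl (fun d node => d.insert node 0) d').items.map (pvMark c) := by
  induction t with
  | nil => intro d d' h; simpa using h
  | cons n rest ih =>
      intro d d' h
      simp only [List.foldl_cons]
      apply ih
      have hstep :
          (if c.contains n then d.insert n 100
           else
             if (c.length : Int) > 0 ∧ (c.length : Int) ≤ tot then d.insert n 0
             else d.insert n 0)
          = d.insert n (if n ∈ c then 100 else 0) := by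
        by_cases hc : n ∈ c <;> simp [hc]
      rw [hstep]
      have hcon := contains_of_items_map d d' c h n
      rw [PySem.Dict.items_insert, PySem.Dict.items_insert, hcon]
      by_cases hdc : d'.contains n = true
      · simp only [hdc, if_true, h, List.map_map]
        exact List.map_congr_left (fun p _ => pvMark_step c n p)
      · simp only [hdc, Bool.false_eq_true, if_false, List.map_append, h]
        congr 1
        by_cases hcc : n ∈ c <;> simp [pvMark, hcc]

-- B's second loop rewrites the items pointwise with pvMark
theorem foldB_items (c : List String) :
    ∀ (d : PySem.Dict String Int),
    (c.foldl (fun np node => if np.contains node then np.insert node 100 else np) d).items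
      = d.items.map (pvMark c) := by
  induction c with
  | nil =>
      intro d
      have h0 : d.items.map (pvMark []) = d.items.map id :=
        List.map_congr_left (fun p _ => by simp [pvMark])
      simp [List.foldl_nil, h0]
  | cons n rest ih =>
      intro d
      simp only [List.foldl_cons]
      rw [ih]
      by_cases hdc : d.contains n = true
      · rw [if_pos hdc, PySem.Dict.items_insert, if_pos hdc, List.map_map]
        apply List.map_congr_left
        intro p _
        simp only [Function.comp_apply]
        by_cases hpn : p.1 = n
        · simp [pvMark, hpn]
        · simp [pvMark, hpn, List.mem_cons]
      · rw [if_neg hdc]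
        apply List.map_congr_left
        intro p hp
        have hkey : p.1 ∈ d.keys := PySem.Dict.mem_keys_of_mem_items d hp
        have hne : ¬ p.1 = n := by
          intro hEq
          apply hdc
          rw [PySem.Dict.contains_eq_decide_mem_keys]
          simp [← hEq, hkey]
        simp [pvMark, hne, List.mem_cons]

-- ===== VERDICT (by name: the statement is the Claim_ definition above) =====
theorem calculate_node_progress_spec : Claim_equal_calculate_node_progress := by
  intro c t _
  unfold Spec_calculate_node_progress calculate_node_progress calculate_node_progress_alt
  rw [foldB_items]
  exact foldA_items c t (t.length : Int) PySem.Dict.empty PySem.Dict.empty (by simp [PySem.Dict.empty])
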